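-- pv_equiv track=rewrite | github.com/Neeraja0613/codemind-python | count_the_specials.py | countSpecials
-- ===== SOURCE A (Python) =====
-- from collections import Counter
--
-- def countSpecials(k, arr):
--     c=0
--     n=len(arr)//k
--     x=Counter(arr)
--     for i in x:
--         if x[i]==n:
--             c+=1
--     return c
-- ===== SOURCE B (Python) =====
-- def countSpecials(k, arr):
--     n = len(arr) // k
--     s = sorted(arr)
--     if not s:
--         return 0
--     c = 0
--     prev = s[0]
--     run = 1
--     for v in s[1:]:
--         if v == prev:
--             run += 1
--         else:
--             if run == n:
--                 c += 1
--             prev = v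
--             run = 1
--     if run == n:
--         c += 1
--     return c
-- ===== Notes on version B (the rewrite author's own statement) =====
-- stated objective: alternative
-- what changed: Replaced the Counter hash-table frequency pass with a sort-then-scan: sort a copy of arr and count lengths of consecutive equal runs, incrementing the result when a run's length equals len(arr)//k.
import Mathlib
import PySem

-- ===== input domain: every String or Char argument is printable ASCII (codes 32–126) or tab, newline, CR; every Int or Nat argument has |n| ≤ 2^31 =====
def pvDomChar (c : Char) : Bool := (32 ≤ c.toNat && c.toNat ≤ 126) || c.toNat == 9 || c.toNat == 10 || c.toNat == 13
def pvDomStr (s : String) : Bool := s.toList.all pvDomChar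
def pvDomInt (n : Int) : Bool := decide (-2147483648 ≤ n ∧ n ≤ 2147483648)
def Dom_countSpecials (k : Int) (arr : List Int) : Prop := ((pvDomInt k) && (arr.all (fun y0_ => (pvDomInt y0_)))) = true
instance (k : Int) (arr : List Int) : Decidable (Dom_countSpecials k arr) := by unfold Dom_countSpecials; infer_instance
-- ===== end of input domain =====

-- B replaces A's Counter frequency table by a sort-then-scan over runs of equal values (alternative algorithm, not claimed faster).

-- ===== PORT A =====
-- c=0; n=len(arr)//k; x=Counter(arr); for i in x: if x[i]==n: c+=1; return c
-- (Counter lookup x[i] is get-with-default-0; iterating a Counter visits its keys in first-occurrence order)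
def countSpecials (k : Int) (arr : List Int) : Int :=
  let n : Int := PySem.Int.floordiv (arr.length : Int) k
  let x : PySem.Dict Int Int := PySem.Dict.counter arr
  (PySem.Dict.keys x).foldl (fun c i => if PySem.Dict.getD x i 0 == n then c + 1 else c) 0

-- ===== PORT B =====
-- the for-loop of Source B over s[1:] with state (c, prev, run), then the final run check
def csLoop (n : Int) (ys : List Int) (st : Int × Int × Int) : Int :=
  let st := ys.foldl (fun (st : Int × Int × Int) v =>
    if v == st.2.1 then (st.1, st.2.1, st.2.2 + 1)
    else ((if st.2.2 == n then st.1 + 1 else st.1), v, 1)) st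
  if st.2.2 == n then st.1 + 1 else st.1

-- 'if not s: return 0' then the loop seeded with (c=0, prev=s[0], run=1)
def csBody (n : Int) (s : List Int) : Int :=
  match s with
  | [] => 0
  | x :: rest => csLoop n rest (0, x, 1)

def countSpecials_alt (k : Int) (arr : List Int) : Int :=
  let n : Int := PySem.Int.floordiv (arr.length : Int) k
  csBody n (PySem.List.sorted arr (fun v => v) false)

-- ===== PRECONDITION & SPEC =====
-- Pre_ excludes exactly k = 0, on which Python's len(arr)//k raises ZeroDivisionError (in A and in B alike).
def Pre_countSpecials (k : Int) (arr : List Int) : Prop := k ≠ 0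
instance (k : Int) (arr : List Int) : Decidable (Pre_countSpecials k arr) := by unfold Pre_countSpecials; infer_instance
def pvWitness_countSpecials : Int × List Int := (2, [1, 2, 2, 3])

def Spec_countSpecials (k : Int) (arr : List Int) (out : Int) : Prop := out = countSpecials_alt k arr
instance (k : Int) (arr : List Int) (out : Int) : Decidable (Spec_countSpecials k arr out) := by unfold Spec_countSpecials; infer_instance

-- ===== CLAIM (what is proved, stated in full; the proofs are below) =====
def Claim_equal_countSpecials : Prop := ∀ (k : Int) (arr : List Int), Dom_countSpecials k arr → Pre_countSpecials k arr → Spec_countSpecials k arr (countSpecials k arr)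

-- ===== LEMMAS AND PROOFS =====

-- in a ≤-sorted list prev :: ys, prev does not survive dropping its leading run
lemma not_mem_dropWhile_of_sorted (prev : Int) :
    ∀ ys : List Int, (prev :: ys).Pairwise (· ≤ ·) →
      prev ∉ ys.dropWhile (· == prev) := by
  intro ys
  induction ys with
  | nil => intro _ h; simp [List.dropWhile] at h
  | cons y ys ih =>
    intro hp
    rcases List.pairwise_cons.mp hp with ⟨hle, hyys⟩
    by_cases hy : y = prev
    · subst hy
      simpa [List.dropWhile] using ih hyys
    · intro hmem
      rw [List.dropWhile_cons_of_neg (by simp [hy])] at hmem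
      rcases List.mem_cons.mp hmem with hmem | hmem
      · exact hy hmem.symm
      · have h1 : prev ≤ y := hle y (List.mem_cons_self ..)
        have h2 : y ≤ prev := (List.pairwise_cons.mp hyys).1 prev hmem
        exact hy (le_antisymm h2 h1)

-- the scan loop of B, characterised: the current run is closed together with the remaining
-- copies of prev, then the body restarts on what is left after that run
lemma csLoop_eq (n : Int) :
    ∀ (ys : List Int) (c prev run : Int), (prev :: ys).Pairwise (· ≤ ·) →
      csLoop n ys (c, prev, run)
        = c + (if run + (ys.count prev : Int) = n then 1 else 0)
            + csBody n (ys.dropWhile (· == prev)) := by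
  intro ys
  induction ys with
  | nil =>
    intro c prev run _
    simp only [csLoop, csBody, List.foldl_nil, List.dropWhile_nil, List.count_nil]
    by_cases h : run = n <;> simp [h]
  | cons y ys ih =>
    intro c prev run hp
    rcases List.pairwise_cons.mp hp with ⟨hle, hyys⟩
    by_cases hy : y = prev
    · subst hy
      have hstep : csLoop n (y :: ys) (c, y, run) = csLoop n ys (c, y, run + 1) := by
        simp [csLoop]
      rw [hstep, ih c y (run + 1) hyys,
          List.dropWhile_cons_of_pos (by simp)]
      have : (run + 1 + ((ys.count y : Nat) : Int) = n) ↔ (run + ((y :: ys).count y : Int) = n) := by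
        simp; constructor <;> intro h <;> omega
      simp only [this]
    · have hstep : csLoop n (y :: ys) (c, prev, run)
          = csLoop n ys ((if run == n then c + 1 else c), y, 1) := by
        simp [csLoop, hy]
      have hcnt : prev ∉ y :: ys := by
        intro hmem
        rcases List.mem_cons.mp hmem with hmem | hmem
        · exact hy hmem.symm
        · have hpy : prev ≤ y := hle y (List.mem_cons_self ..)
          have hyp : y ≤ prev := (List.pairwise_cons.mp hyys).1 prev hmem
          exact hy (le_antisymm hyp hpy)
      have hbody : csBody n (y :: ys) = csLoop n ys (0, y, 1) := rfl
      rw [hstep, ih _ y 1 hyys,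
          List.dropWhile_cons_of_neg (by simp [hy]),
          List.count_eq_zero.mpr hcnt, hbody, ih 0 y 1 hyys]
      by_cases h : run = n <;> simp [h] <;> ring

-- B's body counts, over the distinct values of a sorted list, those whose count equals n
lemma csBody_eq (n : Int) :
    ∀ (N : Nat) (s : List Int), s.length ≤ N → s.Pairwise (· ≤ ·) →
      csBody n s = ((PySem.List.dedup s).countP (fun v => (s.count v : Int) == n) : Int) := by
  intro N
  induction N with
  | zero =>
    intro s hlen _
    have : s = [] := List.eq_nil_of_length_eq_zero (Nat.le_zero.mp hlen)
    subst this
    simp [csBody, PySem.List.dedup_eq_ofList, PySem.Set.ofList]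
  | succ N ih =>
    intro s hlen hp
    match s with
    | [] => simp [csBody, PySem.List.dedup_eq_ofList, PySem.Set.ofList]
    | x :: rest =>
      have hcl : csBody n (x :: rest) = csLoop n rest (0, x, 1) := rfl
      rw [hcl, csLoop_eq n rest 0 x 1 hp]
      set d := rest.dropWhile (· == x) with hd
      have hdsub : d.Sublist rest := List.dropWhile_sublist _
      have hdlen : d.length ≤ N := le_trans hdsub.length_le (by simpa using hlen)
      have hdp : d.Pairwise (· ≤ ·) := ((List.pairwise_cons.mp hp).2).sublist hdsub
      rw [ih d hdlen hdp]
      have hxd : x ∉ d := not_mem_dropWhile_of_sorted x rest hp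
      have htake : ∀ v ∈ rest.takeWhile (· == x), v = x := by
        intro v hv
        simpa using List.mem_takeWhile_imp hv
      -- membership of the original list splits into x and the tail after x's run
      have hmem : ∀ a : Int, a ∈ x :: rest ↔ a = x ∨ a ∈ d := by
        intro a
        constructor
        · intro hv
          rcases List.mem_cons.mp hv with hv | hv
          · exact Or.inl hv
          · rw [← List.takeWhile_append_dropWhile (p := (· == x)) (l := rest)] at hv
            rcases List.mem_append.mp hv with h | h
            · exact Or.inl (htake a h)
            · exact Or.inr h
        · rintro (rfl | hv)
          · exact List.mem_cons_self ..
          · exact List.mem_cons_of_mem _ (hdsub.mem hv)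
      -- counts of values surviving the run are unchanged
      have hcnt : ∀ v ∈ PySem.List.dedup d, ((x :: rest).count v : Int) = (d.count v : Int) := by
        intro v hv
        have hvd : v ∈ d := by
          rw [PySem.List.dedup_eq_ofList] at hv
          exact (PySem.Set.mem_ofList d v).mp hv
        have hvx : v ≠ x := fun h => hxd (h ▸ hvd)
        have hrest : rest.count v = d.count v := by
          conv_lhs => rw [← List.takeWhile_append_dropWhile (p := (· == x)) (l := rest)]
          rw [List.count_append, ← hd]
          have : (rest.takeWhile (· == x)).count v = 0 :=
            List.count_eq_zero.mpr (fun h => hvx (htake v h))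
          omega
        have hcc : (x :: rest).count v = rest.count v := by
          simp [Ne.symm hvx]
        rw [hcc, hrest]
      -- the distinct values of x :: rest are, as a set, x plus those of d
      have hnd1 : (PySem.List.dedup (x :: rest)).Nodup := by
        rw [PySem.List.dedup_eq_ofList]; exact PySem.Set.nodup_ofList _
      have hndd : (PySem.List.dedup d).Nodup := by
        rw [PySem.List.dedup_eq_ofList]; exact PySem.Set.nodup_ofList _
      have hnd2 : (x :: PySem.List.dedup d).Nodup := by
        refine List.nodup_cons.mpr ⟨?_, hndd⟩
        rw [PySem.List.dedup_eq_ofList]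
        exact fun h => hxd ((PySem.Set.mem_ofList d x).mp h)
      have hperm : (PySem.List.dedup (x :: rest)).Perm (x :: PySem.List.dedup d) := by
        rw [List.perm_ext_iff_of_nodup hnd1 hnd2]
        intro a
        rw [PySem.List.dedup_eq_ofList, PySem.Set.mem_ofList, hmem a,
            List.mem_cons, PySem.List.dedup_eq_ofList, PySem.Set.mem_ofList]
      rw [hperm.countP_eq, List.countP_cons,
          List.countP_congr
            (p := fun v => ((x :: rest).count v : Int) == n)
            (q := fun v => ((d.count v : Nat) : Int) == n)
            (fun v hv => by simp only [beq_iff_eq, hcnt v hv])]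
      have hx : ((x :: rest).count x : Int) = 1 + (rest.count x : Int) := by
        rw [List.count_cons_self]; push_cast; ring
      by_cases h : 1 + (rest.count x : Int) = n
      · simp only [beq_iff_eq, hx, h, if_true]
        push_cast
        ring
      · simp only [beq_iff_eq, hx, h, if_false]
        push_cast
        ring

-- ===== VERDICT (by name: the statement is the Claim_ definition above) =====
theorem countSpecials_spec : Claim_equal_countSpecials := by
  intro k arr _ _
  unfold Spec_countSpecials countSpecials countSpecials_alt
  simp only []
  set n : Int := PySem.Int.floordiv (arr.length : Int) k with hn
  set s : List Int := PySem.List.sorted arr (fun v => v) false with hs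
  have hperm_s : s.Perm arr := PySem.List.sorted_perm arr (fun v => v) false
  have hp : s.Pairwise (· ≤ ·) := by
    simpa using PySem.List.sorted_pairwise arr (fun v => v)
  -- A's loop is a countP over the Counter's keys, i.e. over the distinct values of arr
  rw [PySem.List.foldl_if_add_one (fun i => PySem.Dict.getD (PySem.Dict.counter arr) i 0 == n),
      PySem.Dict.keys_counter]
  -- B's scan is a countP over the distinct values of s
  rw [csBody_eq n s.length s le_rfl hp]
  rw [List.countP_congr
        (p := fun i => PySem.Dict.getD (PySem.Dict.counter arr) i 0 == n)
        (q := fun v => ((arr.count v : Nat) : Int) == n)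
        (fun v _ => by simp only [PySem.Dict.getD_counter, beq_iff_eq])]
  have hpermd : (PySem.Set.ofList arr).Perm (PySem.List.dedup s) := by
    rw [List.perm_ext_iff_of_nodup (PySem.Set.nodup_ofList _)
          (by rw [PySem.List.dedup_eq_ofList]; exact PySem.Set.nodup_ofList _)]
    intro a
    rw [PySem.Set.mem_ofList, PySem.List.dedup_eq_ofList, PySem.Set.mem_ofList,
        hperm_s.mem_iff]
  rw [hpermd.countP_eq, List.countP_congr
        (p := fun v => ((arr.count v : Nat) : Int) == n)
        (q := fun v => ((s.count v : Nat) : Int) == n)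
        (fun v _ => by simp only [beq_iff_eq, hperm_s.count_eq v])]
  ring
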